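-- pv_equiv track=rewrite | github.com/KatherineSandys/Python | small class things/9/hw9_1.py | dictUnion
-- ===== SOURCE A (Python) =====
-- def dictUnion(listOfDicts):
--     unionNGrams = []
--
--     #remove duplicates and sort
--     for i in listOfDicts:
--         for j in i.keys():
--             if j not in unionNGrams:
--                 unionNGrams.append(j)
--
--     unionNGrams.sort() #sort
--
--     return unionNGrams
-- ===== SOURCE B (Python) =====
-- def dictUnion(listOfDicts):
--     # flatten all keys (with duplicates), sort, then drop adjacent duplicates
--     allKeys = []
--     for d in listOfDicts:
--         allKeys.extend(d.keys())
--     allKeys.sort()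
--     result = []
--     for k in allKeys:
--         if not result or result[-1] != k:
--             result.append(k)
--     return result
-- ===== Notes on version B (the rewrite author's own statement) =====
-- stated objective: faster
-- what changed: Replaces the quadratic membership-test dedup (j not in unionNGrams for every key) by flatten-all-keys, sort once, then a single linear pass dropping adjacent duplicates.
import Mathlib
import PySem

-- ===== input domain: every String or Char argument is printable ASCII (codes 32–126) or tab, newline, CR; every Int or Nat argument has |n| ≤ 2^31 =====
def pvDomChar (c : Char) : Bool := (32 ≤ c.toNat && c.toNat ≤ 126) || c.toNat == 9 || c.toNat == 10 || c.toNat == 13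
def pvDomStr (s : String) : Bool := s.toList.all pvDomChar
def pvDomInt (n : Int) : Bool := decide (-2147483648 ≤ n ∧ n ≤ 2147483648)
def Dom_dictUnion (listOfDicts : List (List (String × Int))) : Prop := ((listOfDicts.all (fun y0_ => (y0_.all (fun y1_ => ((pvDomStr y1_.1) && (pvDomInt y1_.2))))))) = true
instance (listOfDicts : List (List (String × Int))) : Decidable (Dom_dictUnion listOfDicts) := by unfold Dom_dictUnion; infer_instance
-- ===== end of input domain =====

-- B replaces A's quadratic membership-test dedup by flatten-sort-then-drop-adjacent-duplicates (asymptotically faster).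

-- ===== PORT A =====
-- A: accumulate each key not yet present, then sort the accumulated list.
def dictUnion (listOfDicts : List (List (String × Int))) : List String :=
  let unionNGrams : List String :=
    listOfDicts.foldl (fun acc i =>
      (PySem.List.dedup (i.map Prod.fst)).foldl   -- i.keys()
        (fun acc j => if j ∈ acc then acc else acc ++ [j]) acc) []
  PySem.List.sorted unionNGrams (fun x => x) false

-- ===== PORT B =====
-- B: flatten all keys, sort once, one pass dropping adjacent duplicates.
def dictUnion_alt (listOfDicts : List (List (String × Int))) : List String :=
  let allKeys : List String :=
    listOfDicts.foldl (fun acc d => acc ++ PySem.List.dedup (d.map Prod.fst)) []  -- extend with d.keys()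
  let s := PySem.List.sorted allKeys (fun x => x) false
  -- for k in s: if not result or result[-1] != k: result.append(k)
  s.foldl (fun res k => if res.getLast? = some k then res else res ++ [k]) []

-- ===== PRECONDITION & SPEC =====
def Spec_dictUnion (listOfDicts : List (List (String × Int))) (out : List String) : Prop := out = dictUnion_alt listOfDicts
instance (listOfDicts : List (List (String × Int))) (out : List String) : Decidable (Spec_dictUnion listOfDicts out) := by unfold Spec_dictUnion; infer_instance

-- ===== CLAIM (what is proved, stated in full; the proofs are below) =====
def Claim_equal_dictUnion : Prop := ∀ (listOfDicts : List (List (String × Int))), Dom_dictUnion listOfDicts → Spec_dictUnion listOfDicts (dictUnion listOfDicts)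

-- ===== LEMMAS AND PROOFS =====

-- A's first-occurrence accumulator: membership
theorem pvUniq_mem (l : List String) (acc : List String) (x : String) :
    x ∈ l.foldl (fun acc j => if j ∈ acc then acc else acc ++ [j]) acc ↔ x ∈ acc ∨ x ∈ l := by
  induction l generalizing acc with
  | nil => simp
  | cons k t ih =>
    simp only [List.foldl_cons]
    by_cases hk : k ∈ acc
    · rw [if_pos hk, ih]
      simp only [List.mem_cons]
      constructor
      · tauto
      · rintro (h | h | h)
        · exact Or.inl h
        · exact Or.inl (h ▸ hk)
        · exact Or.inr h
    · rw [if_neg hk, ih]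
      simp only [List.mem_append, List.mem_cons]
      tauto

-- A's first-occurrence accumulator: no duplicates
theorem pvUniq_nodup (l : List String) (acc : List String) (h : acc.Nodup) :
    (l.foldl (fun acc j => if j ∈ acc then acc else acc ++ [j]) acc).Nodup := by
  induction l generalizing acc with
  | nil => exact h
  | cons k t ih =>
    simp only [List.foldl_cons]
    by_cases hk : k ∈ acc
    · rw [if_pos hk]; exact ih acc h
    · refine ih _ ?_
      rw [if_neg hk, List.nodup_append]
      exact ⟨h, by simp, by intro a ha b hb h; simp only [List.mem_singleton] at hb; exact hk ((hb ▸ h) ▸ ha)⟩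

-- B's adjacent-duplicate scan over a ≤-sorted list: invariant induction
theorem pvScan_key (s : List String) (res : List String)
    (hs : s.Pairwise (· ≤ ·)) (hres : res.Pairwise (· < ·))
    (hle : ∀ a ∈ res, ∀ b ∈ s, a ≤ b ∧ (a = b → res.getLast? = some a)) :
    (s.foldl (fun res k => if res.getLast? = some k then res else res ++ [k]) res).Pairwise (· < ·) ∧
    (∀ x, x ∈ s.foldl (fun res k => if res.getLast? = some k then res else res ++ [k]) res ↔
          x ∈ res ∨ x ∈ s) := by
  induction s generalizing res with
  | nil => exact ⟨hres, fun x => by simp⟩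
  | cons k t ih =>
    have hst := (List.pairwise_cons.mp hs)
    simp only [List.foldl_cons]
    by_cases hlast : res.getLast? = some k
    · rw [if_pos hlast]
      have hkmem : k ∈ res := List.mem_of_getLast? hlast
      have hle' : ∀ a ∈ res, ∀ b ∈ t, a ≤ b ∧ (a = b → res.getLast? = some a) := by
        intro a ha b hb
        refine ⟨(hle a ha k (by simp)).1.trans (hst.1 b hb), fun hab => ?_⟩
        have h1 : a ≤ k := (hle a ha k (by simp)).1
        have h2 : k ≤ b := hst.1 b hb
        have : a = k := le_antisymm h1 (hab ▸ h2)
        rw [this]; exact hlast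
      obtain ⟨hp, hm⟩ := ih res hst.2 hres hle'
      refine ⟨hp, fun x => ?_⟩
      rw [hm x]
      simp only [List.mem_cons]
      constructor
      · tauto
      · rintro (h | h | h)
        · exact Or.inl h
        · exact Or.inl (h ▸ hkmem)
        · exact Or.inr h
    · rw [if_neg hlast]
      have hltk : ∀ a ∈ res, a < k := by
        intro a ha
        rcases lt_or_eq_of_le (hle a ha k (by simp)).1 with h | h
        · exact h
        · exact absurd ((hle a ha k (by simp)).2 h) (h ▸ hlast)
      have hres' : (res ++ [k]).Pairwise (· < ·) := by
        rw [List.pairwise_append]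
        exact ⟨hres, by simp, by simpa using hltk⟩
      have hle' : ∀ a ∈ res ++ [k], ∀ b ∈ t, a ≤ b ∧ (a = b → (res ++ [k]).getLast? = some a) := by
        intro a ha b hb
        have hlast' : (res ++ [k]).getLast? = some k := by simp
        rcases List.mem_append.mp ha with ha' | ha'
        · refine ⟨((hle a ha' k (by simp)).1).trans (hst.1 b hb), fun hab => ?_⟩
          have : a = k := le_antisymm (hle a ha' k (by simp)).1 (hab ▸ hst.1 b hb)
          rw [this]; exact hlast'
        · have hak : a = k := by simpa using ha'
          exact ⟨hak ▸ hst.1 b hb, fun _ => hak ▸ hlast'⟩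
      obtain ⟨hp, hm⟩ := ih (res ++ [k]) hst.2 hres' hle'
      refine ⟨hp, fun x => ?_⟩
      rw [hm x]
      simp only [List.mem_append, List.mem_cons]
      tauto

theorem pvA_flat (l : List (List (String × Int))) (acc : List String) :
    l.foldl (fun acc i =>
      (PySem.List.dedup (i.map Prod.fst)).foldl
        (fun acc j => if j ∈ acc then acc else acc ++ [j]) acc) acc =
    (l.flatMap (fun d => PySem.List.dedup (d.map Prod.fst))).foldl
      (fun acc j => if j ∈ acc then acc else acc ++ [j]) acc := by
  induction l generalizing acc with
  | nil => rfl
  | cons d t ih =>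
    simp only [List.foldl_cons, List.flatMap_cons, List.foldl_append]
    exact ih _

theorem pvB_flat (l : List (List (String × Int))) (acc : List String) :
    l.foldl (fun acc d => acc ++ PySem.List.dedup (d.map Prod.fst)) acc =
    acc ++ l.flatMap (fun d => PySem.List.dedup (d.map Prod.fst)) := by
  induction l generalizing acc with
  | nil => simp
  | cons d t ih =>
    simp only [List.foldl_cons, List.flatMap_cons]
    rw [ih, List.append_assoc]

theorem dictUnion_eq (listOfDicts : List (List (String × Int))) :
    dictUnion listOfDicts = dictUnion_alt listOfDicts := by
  unfold dictUnion dictUnion_alt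
  rw [pvA_flat, pvB_flat, List.nil_append]
  set flat : List String := listOfDicts.flatMap (fun d => PySem.List.dedup (d.map Prod.fst))
  set u := flat.foldl (fun acc j => if j ∈ acc then acc else acc ++ [j]) [] with hu
  set s := PySem.List.sorted flat (fun x => x) false with hs
  set r := s.foldl (fun res k => if res.getLast? = some k then res else res ++ [k]) [] with hr
  have hsp : s.Pairwise (· ≤ ·) := PySem.List.sorted_pairwise flat (fun x => x)
  obtain ⟨hrp, hrm⟩ := pvScan_key s [] hsp (by simp) (by simp)
  have hun : u.Nodup := pvUniq_nodup flat [] (by simp)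
  have hrn : r.Nodup := hrp.imp ne_of_lt
  have hmem : ∀ x, x ∈ r ↔ x ∈ u := by
    intro x
    rw [hrm x, pvUniq_mem]
    simp [hs, PySem.List.mem_sorted]
  have hperm : r.Perm u := (List.perm_ext_iff_of_nodup hrn hun).mpr hmem
  exact PySem.List.sorted_id_eq_of_perm_of_pairwise u r hperm (hrp.imp le_of_lt)

-- ===== VERDICT (by name: the statement is the Claim_ definition above) =====
theorem dictUnion_spec : Claim_equal_dictUnion := by
  intro l _
  exact dictUnion_eq l
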